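-- pv_equiv track=rewrite | github.com/Ruditha/legalapp | backend/nlp_processing.py | enhance_summary
-- ===== SOURCE A (Python) =====
-- LEGAL_KEYWORDS_SIMPLE_FOR_HIGHLIGHTING = [
--     "must", "shall", "will", "liable", "indemnify", "hold harmless",
--     "terminate", "expiration", "duration", "penalty", "breach", "default",
--     "ownership", "title", "rights", "obligations", "warranties", "covenants",
--     "notwithstanding", "hereby", "herein", "thereof", "thereby", "agreement",
--     "contract", "clause", "section", "article", "annexure", "schedule",
--     "dispute", "arbitration", "jurisdiction", "governing law", "effective date",
--     "commencement", "renewal", "notice", "consent", "waiver", "severability",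
--     "amendment", "assignment", "successors", "assigns", "force majeure",
--     "confidential", "intellectual property", "damages", "injunction", "remedies",
--     "representation", "warranty", "condition", "undertaking", "cancellation",
--     "revocation", "validity", "enforceable", "binding", "stipulated", "provided that",
--     "unless", "except", "not limited to", "including but not limited to",
--     "notwithstanding anything to the contrary", "without prejudice", "hereunder"
-- ]
--
-- def enhance_summary(summary_text: str) -> str:
--     """
--     Adds simple markers to sentences in the summary that contain legal keywords.
--     """
--     enhanced_sentences = []
--     for sent in summary_text.split('.'):
--         if not sent.strip():
--             continue
--
--         found_keyword = False
--         for keyword in LEGAL_KEYWORDS_SIMPLE_FOR_HIGHLIGHTING: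
--             if keyword in sent.lower():
--                 enhanced_sentences.append(f"⚖️ {sent.strip()}")
--                 found_keyword = True
--                 break
--         if not found_keyword:
--             enhanced_sentences.append(sent.strip())
--
--     return '. '.join(enhanced_sentences) + ('.' if summary_text.endswith('.') else '')
-- ===== SOURCE B (Python) =====
-- LEGAL_KEYWORDS_SIMPLE_FOR_HIGHLIGHTING = [
--     "must", "shall", "will", "liable", "indemnify", "hold harmless",
--     "terminate", "expiration", "duration", "penalty", "breach", "default",
--     "ownership", "title", "rights", "obligations", "warranties", "covenants",
--     "notwithstanding", "hereby", "herein", "thereof", "thereby", "agreement",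
--     "contract", "clause", "section", "article", "annexure", "schedule",
--     "dispute", "arbitration", "jurisdiction", "governing law", "effective date",
--     "commencement", "renewal", "notice", "consent", "waiver", "severability",
--     "amendment", "assignment", "successors", "assigns", "force majeure",
--     "confidential", "intellectual property", "damages", "injunction", "remedies",
--     "representation", "warranty", "condition", "undertaking", "cancellation",
--     "revocation", "validity", "enforceable", "binding", "stipulated", "provided that",
--     "unless", "except", "not limited to", "including but not limited to",
--     "notwithstanding anything to the contrary", "without prejudice", "hereunder"
-- ]
--
-- # first-character index: bucket the keywords by their first letter, so the scan
-- # at each position only tries the keywords that could start there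
-- _INDEX = {}
-- for _k in LEGAL_KEYWORDS_SIMPLE_FOR_HIGHLIGHTING:
--     _INDEX.setdefault(_k[0], []).append(_k)
--
--
-- def _has_legal_keyword(low):
--     for i in range(len(low)):
--         for k in _INDEX.get(low[i], ()):
--             if low.startswith(k, i):
--                 return True
--     return False
--
--
-- def enhance_summary(summary_text: str) -> str:
--     pieces = [
--         ("\u2696\ufe0f " + s.strip()) if _has_legal_keyword(s.lower()) else s.strip()
--         for s in summary_text.split('.')
--         if s.strip()
--     ]
--     return '. '.join(pieces) + ('.' if summary_text.endswith('.') else '')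
-- ===== Notes on version B (the rewrite author's own statement) =====
-- stated objective: alternative
-- what changed: Replaced A's keyword-outer inner loop (a substring search per keyword with break and a found flag inside an accumulator loop) by a position-outer scan of the lowered sentence driven by a first-character bucket index (dict built once from the keyword list), and rebuilt the result as a filter-then-map comprehension over the split pieces instead of an append-with-flag loop.
import Mathlib
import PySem

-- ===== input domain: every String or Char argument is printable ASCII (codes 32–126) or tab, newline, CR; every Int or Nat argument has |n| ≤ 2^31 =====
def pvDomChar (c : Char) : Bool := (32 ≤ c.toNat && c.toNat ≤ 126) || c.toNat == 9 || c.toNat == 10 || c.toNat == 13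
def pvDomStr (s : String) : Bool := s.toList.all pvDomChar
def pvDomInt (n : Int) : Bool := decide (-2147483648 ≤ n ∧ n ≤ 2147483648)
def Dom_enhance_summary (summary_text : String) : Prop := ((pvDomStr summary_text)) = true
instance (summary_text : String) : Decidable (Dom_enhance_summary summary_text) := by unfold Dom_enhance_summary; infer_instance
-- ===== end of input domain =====

-- B replaces A's keyword-outer inner loop with break by a position-outer scan of the lowered
-- sentence driven by a first-character bucket index of the keywords, and a filter-then-map
-- comprehension over the split pieces (objective: alternative).

-- the module constant LEGAL_KEYWORDS_SIMPLE_FOR_HIGHLIGHTING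
def pvKeywords : List (List Char) :=
  ["must".toList, "shall".toList, "will".toList, "liable".toList, "indemnify".toList, "hold harmless".toList,
   "terminate".toList, "expiration".toList, "duration".toList, "penalty".toList, "breach".toList, "default".toList,
   "ownership".toList, "title".toList, "rights".toList, "obligations".toList, "warranties".toList, "covenants".toList,
   "notwithstanding".toList, "hereby".toList, "herein".toList, "thereof".toList, "thereby".toList, "agreement".toList,
   "contract".toList, "clause".toList, "section".toList, "article".toList, "annexure".toList, "schedule".toList,
   "dispute".toList, "arbitration".toList, "jurisdiction".toList, "governing law".toList, "effective date".toList,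
   "commencement".toList, "renewal".toList, "notice".toList, "consent".toList, "waiver".toList, "severability".toList,
   "amendment".toList, "assignment".toList, "successors".toList, "assigns".toList, "force majeure".toList,
   "confidential".toList, "intellectual property".toList, "damages".toList, "injunction".toList, "remedies".toList,
   "representation".toList, "warranty".toList, "condition".toList, "undertaking".toList, "cancellation".toList,
   "revocation".toList, "validity".toList, "enforceable".toList, "binding".toList, "stipulated".toList, "provided that".toList,
   "unless".toList, "except".toList, "not limited to".toList, "including but not limited to".toList,
   "notwithstanding anything to the contrary".toList, "without prejudice".toList, "hereunder".toList]

-- "⚖️ " = U+2696 U+FE0F space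
def pvMarker : List Char := [Char.ofNat 0x2696, Char.ofNat 0xFE0F, ' ']

-- ===== PORT A =====
-- inner 'for keyword in …: if keyword in sent.lower(): append; found=True; break'
def pvAKwLoop (acc : List (List Char)) (sent : List Char) :
    List (List Char) → (List (List Char) × Bool)
  | [] => (acc, false)
  | k :: rest =>
      if PySem.Chars.isIn k (PySem.Chars.lower sent) then
        (acc ++ [pvMarker ++ PySem.Chars.strip sent], true)
      else pvAKwLoop acc sent rest

def enhance_summary (summary_text : String) : String :=
  let enhanced := (PySem.Chars.splitOn summary_text.toList ['.']).foldl
    (fun acc sent =>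
      if PySem.Chars.strip sent = [] then acc
      else
        let r := pvAKwLoop acc sent pvKeywords
        if r.2 then r.1 else r.1 ++ [PySem.Chars.strip sent])
    []
  String.ofList (PySem.Chars.join ['.', ' '] enhanced ++
    (if PySem.Chars.endswith summary_text.toList ['.'] then ['.'] else []))

-- ===== PORT B =====
-- _INDEX: setdefault(_k[0], []).append(_k); _k[0] ported as headI (exact: every keyword is nonempty)
def pvIndex : PySem.Dict Char (List (List Char)) :=
  pvKeywords.foldl
    (fun d k => PySem.Dict.insert d k.headI (PySem.Dict.getD d k.headI [] ++ [k]))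
    PySem.Dict.empty

-- for i in range(len(low)): for k in _INDEX.get(low[i], ()): if low.startswith(k, i): return True
-- low[i] ported as low.getD i ' ' and low.startswith(k, i) as (low.drop i).startswith k (exact: 0 ≤ i < len(low))
def pvHasKw (low : List Char) : Bool :=
  (List.range low.length).any (fun i =>
    (PySem.Dict.getD pvIndex (low.getD i ' ') []).any
      (fun k => PySem.Chars.startswith (low.drop i) k))

def pvMark (sent : List Char) : List Char :=
  if pvHasKw (PySem.Chars.lower sent) then pvMarker ++ PySem.Chars.strip sent
  else PySem.Chars.strip sent

def enhance_summary_alt (summary_text : String) : String :=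
  let pieces := ((PySem.Chars.splitOn summary_text.toList ['.']).filter
      (fun t => decide (PySem.Chars.strip t ≠ []))).map pvMark
  String.ofList (PySem.Chars.join ['.', ' '] pieces ++
    (if PySem.Chars.endswith summary_text.toList ['.'] then ['.'] else []))

-- ===== PRECONDITION & SPEC =====
def Spec_enhance_summary (summary_text : String) (out : String) : Prop := out = enhance_summary_alt summary_text
instance (summary_text : String) (out : String) : Decidable (Spec_enhance_summary summary_text out) := by unfold Spec_enhance_summary; infer_instance

-- ===== CLAIM (what is proved, stated in full; the proofs are below) =====
def Claim_equal_enhance_summary : Prop := ∀ (summary_text : String), Dom_enhance_summary summary_text → Spec_enhance_summary summary_text (enhance_summary summary_text)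

-- ===== LEMMAS AND PROOFS =====

lemma pvKeywords_ne_nil : ∀ k ∈ pvKeywords, k ≠ [] := by decide

-- every keyword sits in the bucket of its first character …
set_option maxRecDepth 10000 in
lemma pvIndex_complete : ∀ k ∈ pvKeywords, k ∈ PySem.Dict.getD pvIndex k.headI [] := by decide

-- … and every bucket entry is a keyword
set_option maxRecDepth 10000 in
lemma pvIndex_sound : ∀ p ∈ pvIndex.items, ∀ k ∈ p.2, k ∈ pvKeywords := by decide

-- the bucketed position scan finds a keyword iff some keyword is a substring
lemma pvHasKw_eq (low : List Char) :
    pvHasKw low = pvKeywords.any (fun k => PySem.Chars.isIn k low) := by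
  apply Bool.eq_iff_iff.mpr
  simp only [pvHasKw, List.any_eq_true, List.mem_range, PySem.Chars.startswith_iff]
  constructor
  · rintro ⟨i, _, k, hk, hpre⟩
    have hkk : k ∈ pvKeywords := by
      unfold PySem.Dict.getD at hk
      rcases hget : PySem.Dict.get? pvIndex (low.getD i ' ') with _ | b
      · rw [hget] at hk
        simp at hk
      · rw [hget] at hk
        simp only [Option.getD_some] at hk
        simp only [PySem.Dict.get?, Option.map_eq_some_iff] at hget
        obtain ⟨p, hfind, h2⟩ := hget
        exact pvIndex_sound p (List.mem_of_find?_eq_some hfind) k (h2 ▸ hk)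
    exact ⟨k, hkk, (PySem.Chars.exists_prefix_drop_iff_isIn k low).mp ⟨i, hpre⟩⟩
  · rintro ⟨k, hk, hin⟩
    obtain ⟨j, hpre⟩ := (PySem.Chars.exists_prefix_drop_iff_isIn k low).mpr hin
    have hk0 : k ≠ [] := pvKeywords_ne_nil k hk
    have hj : j < low.length := by
      by_contra h
      rw [not_lt] at h
      rw [List.drop_eq_nil_of_le h] at hpre
      exact hk0 (List.prefix_nil.mp hpre)
    refine ⟨j, hj, k, ?_, hpre⟩
    have hc : low.getD j ' ' = k.headI := by
      rcases k with _ | ⟨kh, kt⟩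
      · exact absurd rfl hk0
      · obtain ⟨t, ht⟩ := hpre
        have hd : low.drop j = kh :: (kt ++ t) := by simpa using ht.symm
        have h0 : low[j]? = some kh := by
          have h1 : (low.drop j)[0]? = low[j + 0]? := List.getElem?_drop
          rw [hd] at h1
          simpa using h1.symm
        rw [List.getD_eq_getElem?_getD, h0]
        rfl
    rw [hc]
    exact pvIndex_complete k hk

lemma pvAKwLoop_eq (acc : List (List Char)) (sent : List Char) (ks : List (List Char)) :
    pvAKwLoop acc sent ks =
      (if ks.any (fun k => PySem.Chars.isIn k (PySem.Chars.lower sent)) then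
          acc ++ [pvMarker ++ PySem.Chars.strip sent]
        else acc,
       ks.any (fun k => PySem.Chars.isIn k (PySem.Chars.lower sent))) := by
  induction ks with
  | nil => simp [pvAKwLoop]
  | cons k rest ih =>
      by_cases h : PySem.Chars.isIn k (PySem.Chars.lower sent) = true <;>
        simp [pvAKwLoop, h, ih]

lemma pvBody_eq (acc : List (List Char)) (sent : List Char) :
    (if PySem.Chars.strip sent = [] then acc
     else
       let r := pvAKwLoop acc sent pvKeywords
       if r.2 then r.1 else r.1 ++ [PySem.Chars.strip sent]) =
    (if PySem.Chars.strip sent ≠ [] then acc ++ [pvMark sent] else acc) := by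
  rw [pvAKwLoop_eq]
  by_cases hs : PySem.Chars.strip sent = [] <;>
    by_cases hk : pvKeywords.any (fun k => PySem.Chars.isIn k (PySem.Chars.lower sent)) = true <;>
      simp [hs, hk, pvMark, pvHasKw_eq]

-- ===== VERDICT =====
theorem enhance_summary_spec : Claim_equal_enhance_summary := by
  intro summary_text _
  unfold Spec_enhance_summary enhance_summary enhance_summary_alt
  have hfold :
      (PySem.Chars.splitOn summary_text.toList ['.']).foldl
        (fun acc sent =>
          if PySem.Chars.strip sent = [] then acc
          else
            let r := pvAKwLoop acc sent pvKeywords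
            if r.2 then r.1 else r.1 ++ [PySem.Chars.strip sent]) [] =
      ((PySem.Chars.splitOn summary_text.toList ['.']).filter
        (fun t => decide (PySem.Chars.strip t ≠ []))).map pvMark := by
    rw [PySem.List.foldl_congr_mem _ _
          (fun acc sent => if PySem.Chars.strip sent ≠ [] then acc ++ [pvMark sent] else acc) _
          (fun acc x _ => pvBody_eq acc x)]
    simpa using PySem.List.foldl_append_ite
      (fun t => PySem.Chars.strip t ≠ []) pvMark
      (PySem.Chars.splitOn summary_text.toList ['.']) []
  rw [hfold]
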